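-- pv_equiv track=rewrite | github.com/sbhowmik7/PSSEcompare | meta/elem_obj.py | neat_write
-- ===== SOURCE A (Python) =====
-- def neat_write(fn, args, line_len=79, initial_indent='',
--         subsequent_indent=''):
--
--     lines = []
--
--     cur_line = []
--     cur_len = 0
--     commas_and_space_len = 0
--
--     new_line = True
--     for arg in args:
--         arg_len = len(arg)
--
--         if ((not new_line) and
--                 (cur_len + arg_len + 2 + commas_and_space_len > line_len)):
--             # 2 is added for the comma and space required to join.
--             cur_line[-1] = cur_line[-1] + ','
--             lines.append(', '.join(cur_line))
--
--             new_line = True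
--
--         if new_line:
--             new_line = False
--             cur_line = []
--             # The number of commas is equal to the number of args.
--             # The number of spaces is one less than number of commas.
--             commas_and_space_len = 1
--
--             # new line
--             # add indents
--             if not lines:
--                 # First line
--                 cur_len = len(fn) + len(initial_indent) + arg_len
--                 cur_line.append('%s%s(%s' % (initial_indent, fn, arg))
--
--             else:
--                 cur_len = len(subsequent_indent) + arg_len
--                 cur_line.append('%s%s' % (subsequent_indent, arg))
--
--         else:
--             # Continue current line.
--             cur_len += arg_len
--             cur_line.append(arg)
--             commas_and_space_len += 2
--
--     # finish last line.
--     cur_line[-1] += ')'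
--     lines.append(', '.join(cur_line))
--
--     return lines
-- ===== SOURCE B (Python) =====
-- def neat_write(fn, args, line_len=79, initial_indent='',
--         subsequent_indent=''):
--     # Phase 1: decide the line breaks, grouping args into one list per line.
--     groups = []
--     cur = []
--     width = 0  # indent (and fn name, for the first line) + sum(len(a) + 2 for a in cur)
--     for arg in args:
--         if cur and width + len(arg) + 1 > line_len:
--             groups.append(cur)
--             cur = []
--         if not cur:
--             width = len(initial_indent) + len(fn) if not groups else len(subsequent_indent)
--         cur.append(arg)
--         width += len(arg) + 2
--     groups.append(cur)
--
--     # Phase 2: render each group into its line.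
--     out = []
--     last = len(groups) - 1
--     for i, g in enumerate(groups):
--         body = ', '.join(g)
--         line = ('%s%s(%s' % (initial_indent, fn, body)) if i == 0 else subsequent_indent + body
--         out.append(line + (',' if i < last else ')'))
--     return out
-- ===== Notes on version B (the rewrite author's own statement) =====
-- stated objective: alternative
-- what changed: A interleaves width accounting, indent choice and line rendering in one stateful pass that emits each finished line at break time; B separates the task into phase 1 (group the args into lines with a single width counter) and phase 2 (render each group, first line vs later lines, comma vs closing paren by position).
import Mathlib
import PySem

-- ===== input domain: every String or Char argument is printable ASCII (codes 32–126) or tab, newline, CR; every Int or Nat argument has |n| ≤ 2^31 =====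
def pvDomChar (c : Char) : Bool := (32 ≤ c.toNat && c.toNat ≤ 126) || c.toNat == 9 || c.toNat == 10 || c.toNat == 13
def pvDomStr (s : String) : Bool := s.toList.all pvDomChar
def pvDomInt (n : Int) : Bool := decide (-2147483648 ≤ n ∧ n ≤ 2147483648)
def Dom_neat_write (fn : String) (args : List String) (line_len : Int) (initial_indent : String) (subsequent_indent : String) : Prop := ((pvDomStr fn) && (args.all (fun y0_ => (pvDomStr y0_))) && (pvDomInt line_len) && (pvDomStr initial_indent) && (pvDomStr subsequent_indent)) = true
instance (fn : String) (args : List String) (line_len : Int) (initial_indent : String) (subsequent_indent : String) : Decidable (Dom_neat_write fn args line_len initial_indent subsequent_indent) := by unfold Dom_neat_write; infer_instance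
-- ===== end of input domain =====

-- B is a two-phase rewrite of A (first group the args into lines, then render the lines);
-- the equivalence is about return values only (neither version mutates its arguments).

-- ===== PORT A =====
-- helper for Python's `l[-1] = l[-1] + suf` (on [] Python raises; A only reaches that when args == [], excluded by Pre_)
def pvSetLast (l : List String) (suf : String) : List String :=
  match l with
  | [] => []
  | [x] => [x ++ suf]
  | x :: y :: t => x :: pvSetLast (y :: t) suf

-- the body of A's `for arg in args` loop; state = (lines, cur_line, cur_len, commas_and_space_len, new_line)
def neatStepA (fn initial_indent subsequent_indent : String) (line_len : Int)
    (st : List String × List String × Int × Int × Bool) (arg : String) :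
    List String × List String × Int × Int × Bool :=
  let lines := st.1
  let cur_line := st.2.1
  let cur_len := st.2.2.1
  let commas_and_space_len := st.2.2.2.1
  let new_line := st.2.2.2.2
  let arg_len := PySem.Str.len arg
  let brk := (!new_line) && decide (cur_len + arg_len + 2 + commas_and_space_len > line_len)
  let cur_line := if brk then pvSetLast cur_line "," else cur_line
  let lines := if brk then lines ++ [PySem.Str.join ", " cur_line] else lines
  let new_line := if brk then true else new_line
  if new_line then
    if lines.isEmpty then
      (lines, [initial_indent ++ fn ++ "(" ++ arg],
        PySem.Str.len fn + PySem.Str.len initial_indent + arg_len, 1, false)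
    else
      (lines, [subsequent_indent ++ arg],
        PySem.Str.len subsequent_indent + arg_len, 1, false)
  else
    (lines, cur_line ++ [arg], cur_len + arg_len, commas_and_space_len + 2, false)

def neat_write (fn : String) (args : List String) (line_len : Int) (initial_indent : String) (subsequent_indent : String) : List String :=
  let st := args.foldl (neatStepA fn initial_indent subsequent_indent line_len) ([], [], 0, 0, true)
  st.1 ++ [PySem.Str.join ", " (pvSetLast st.2.1 ")")]

-- ===== PORT B =====
-- phase 1 loop body; state = (groups, cur, width)
def neatStepB (fn initial_indent subsequent_indent : String) (line_len : Int)
    (st : List (List String) × List String × Int) (arg : String) :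
    List (List String) × List String × Int :=
  let groups := st.1
  let cur := st.2.1
  let width := st.2.2
  let (groups, cur) :=
    if (!cur.isEmpty) && decide (width + PySem.Str.len arg + 1 > line_len) then
      (groups ++ [cur], ([] : List String))
    else (groups, cur)
  let width :=
    if cur.isEmpty then
      if groups.isEmpty then PySem.Str.len initial_indent + PySem.Str.len fn
      else PySem.Str.len subsequent_indent
    else width
  (groups, cur ++ [arg], width + PySem.Str.len arg + 2)

def neat_write_alt (fn : String) (args : List String) (line_len : Int) (initial_indent : String) (subsequent_indent : String) : List String :=
  let st := args.foldl (neatStepB fn initial_indent subsequent_indent line_len) ([], [], 0)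
  let groups := st.1 ++ [st.2.1]
  let last := PySem.List.len groups - 1
  (PySem.List.enumerate groups).map (fun p =>
    let body := PySem.Str.join ", " p.2
    let line := if p.1 == 0 then initial_indent ++ fn ++ "(" ++ body
                else subsequent_indent ++ body
    line ++ (if p.1 < last then "," else ")"))

-- ===== PRECONDITION & SPEC =====
-- Pre_ excludes args = [], on which A raises IndexError (closing-paren write indexes an empty line).
def Pre_neat_write (fn : String) (args : List String) (line_len : Int) (initial_indent : String) (subsequent_indent : String) : Prop :=
  args ≠ []
instance (fn : String) (args : List String) (line_len : Int) (initial_indent : String) (subsequent_indent : String) : Decidable (Pre_neat_write fn args line_len initial_indent subsequent_indent) := by unfold Pre_neat_write; infer_instance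

def pvWitness_neat_write : String × List String × Int × String × String :=
  ("f", ["alpha", "beta", "gamma"], 12, "", "    ")

def Spec_neat_write (fn : String) (args : List String) (line_len : Int) (initial_indent : String) (subsequent_indent : String) (out : List String) : Prop := out = neat_write_alt fn args line_len initial_indent subsequent_indent
instance (fn : String) (args : List String) (line_len : Int) (initial_indent : String) (subsequent_indent : String) (out : List String) : Decidable (Spec_neat_write fn args line_len initial_indent subsequent_indent out) := by unfold Spec_neat_write; infer_instance

-- ===== CLAIM (what is proved, stated in full; the proofs are below) =====
def Claim_equal_neat_write : Prop := ∀ (fn : String) (args : List String) (line_len : Int) (initial_indent : String) (subsequent_indent : String), Dom_neat_write fn args line_len initial_indent subsequent_indent → Pre_neat_write fn args line_len initial_indent subsequent_indent → Spec_neat_write fn args line_len initial_indent subsequent_indent (neat_write fn args line_len initial_indent subsequent_indent)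

-- ===== LEMMAS AND PROOFS =====

-- prefix of a line: `initial_indent + fn + '('` for the first line, `subsequent_indent` after
def pvPreOf (fn initial_indent subsequent_indent : String) (gs : List (List String)) : String :=
  if gs.isEmpty then initial_indent ++ fn ++ "(" else subsequent_indent

-- the finished (comma-closed) lines corresponding to a list of groups
def pvInterior (fn initial_indent subsequent_indent : String) : List (List String) → List String
  | [] => []
  | g :: t => (initial_indent ++ fn ++ "(" ++ PySem.Str.join ", " g ++ ",") ::
      t.map (fun g => subsequent_indent ++ PySem.Str.join ", " g ++ ",")

-- A's state as a function of B's phase-1 state (cur ≠ [])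
def pvAbs (fn initial_indent subsequent_indent : String)
    (st : List (List String) × List String × Int) :
    List String × List String × Int × Int × Bool :=
  (pvInterior fn initial_indent subsequent_indent st.1,
   (match st.2.1 with
    | [] => []
    | h :: t => (pvPreOf fn initial_indent subsequent_indent st.1 ++ h) :: t),
   st.2.2 - 2 * (st.2.1.length : Int),
   2 * (st.2.1.length : Int) - 1,
   false)

lemma chars_join_cons_of_ne_nil (s a : List Char) (l : List (List Char)) (h : l ≠ []) :
    PySem.Chars.join s (a :: l) = a ++ s ++ PySem.Chars.join s l := by
  cases l with
  | nil => exact absurd rfl h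
  | cons b t => exact PySem.Chars.join_cons_cons s a b t

lemma pvSetLast_ne_nil (x : String) (t : List String) (suf : String) :
    pvSetLast (x :: t) suf ≠ [] := by
  cases t <;> simp [pvSetLast]

lemma join_cons_append (s p h : String) (t : List String) :
    PySem.Str.join s ((p ++ h) :: t) = p ++ PySem.Str.join s (h :: t) := by
  apply String.toList_inj.mp
  cases t with
  | nil =>
      simp [PySem.Str.toList_join, PySem.Chars.join_singleton, String.toList_append]
  | cons b t =>
      simp [PySem.Str.toList_join, PySem.Chars.join_cons_cons, String.toList_append,
        List.append_assoc]

lemma join_setLast (s suf : String) (x : String) (t : List String) :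
    PySem.Str.join s (pvSetLast (x :: t) suf) = PySem.Str.join s (x :: t) ++ suf := by
  induction t generalizing x with
  | nil =>
      apply String.toList_inj.mp
      simp [pvSetLast, PySem.Str.toList_join, PySem.Chars.join_singleton, String.toList_append]
  | cons b t ih =>
      apply String.toList_inj.mp
      have hne : (pvSetLast (b :: t) suf).map String.toList ≠ [] := by
        simpa using pvSetLast_ne_nil b t suf
      calc (PySem.Str.join s (pvSetLast (x :: b :: t) suf)).toList
          = x.toList ++ s.toList ++
              PySem.Chars.join s.toList ((pvSetLast (b :: t) suf).map String.toList) := by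
            simp [pvSetLast, PySem.Str.toList_join]
            rw [chars_join_cons_of_ne_nil _ _ _ hne]
            simp [List.append_assoc]
        _ = x.toList ++ s.toList ++ ((PySem.Str.join s (b :: t)).toList ++ suf.toList) := by
            rw [← PySem.Str.toList_join, ih b, String.toList_append]
        _ = (PySem.Str.join s (x :: b :: t)).toList ++ suf.toList := by
            simp [PySem.Str.toList_join, PySem.Chars.join_cons_cons, List.append_assoc]
        _ = (PySem.Str.join s (x :: b :: t) ++ suf).toList := by simp

lemma pvInterior_append (fn ii si : String) (gs : List (List String)) (c : List String) :
    pvInterior fn ii si (gs ++ [c]) =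
      pvInterior fn ii si gs ++ [pvPreOf fn ii si gs ++ PySem.Str.join ", " c ++ ","] := by
  cases gs with
  | nil => simp [pvInterior, pvPreOf]
  | cons g t => simp [pvInterior, pvPreOf, String.append_assoc]

-- the per-step simulation: A's loop body tracks B's through pvAbs
lemma step_rel (fn ii si : String) (ll : Int) (gs : List (List String))
    (h : String) (t : List String) (w : Int) (arg : String) :
    neatStepA fn ii si ll (pvAbs fn ii si (gs, h :: t, w)) arg =
      pvAbs fn ii si (neatStepB fn ii si ll (gs, h :: t, w) arg) := by
  by_cases hc : w + PySem.Str.len arg + 1 > ll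
  · simp only [neatStepA, neatStepB, pvAbs]
    simp only [Bool.not_false, Bool.true_and, decide_eq_true_eq, List.isEmpty_cons]
    have e1 : PySem.Str.join ", " (pvSetLast ((pvPreOf fn ii si gs ++ h) :: t) ",")
        = pvPreOf fn ii si gs ++ PySem.Str.join ", " (h :: t) ++ "," := by
      rw [join_setLast, join_cons_append]
    split_ifs <;>
      first
        | (exfalso; simp_all; done)
        | (exfalso; simp_all; omega)
        | (simp_all [e1, pvPreOf, Prod.mk.injEq]
           first
             | omega
             | (rw [pvInterior_append]; simp [pvPreOf, List.isEmpty_iff])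
             | skip)
  · simp only [neatStepA, neatStepB, pvAbs, Bool.not_false, Bool.true_and, decide_eq_true_eq]
    split_ifs <;>
      first
        | (exfalso; simp_all; done)
        | (exfalso; simp_all; omega)
        | (simp_all [pvPreOf, Prod.mk.injEq]
           first
             | omega
             | skip)

lemma stepB_cur_ne_nil (fn ii si : String) (ll : Int)
    (st : List (List String) × List String × Int) (arg : String) :
    (neatStepB fn ii si ll st arg).2.1 ≠ [] := by
  simp only [neatStepB]
  split <;> simp

lemma foldB_cur_ne_nil (fn ii si : String) (ll : Int) (args : List String)
    (st : List (List String) × List String × Int) (hst : st.2.1 ≠ []) :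
    (args.foldl (neatStepB fn ii si ll) st).2.1 ≠ [] := by
  induction args generalizing st with
  | nil => exact hst
  | cons a args ih => exact ih _ (stepB_cur_ne_nil fn ii si ll st a)

lemma loop_rel (fn ii si : String) (ll : Int) (args : List String)
    (st : List (List String) × List String × Int) (hst : st.2.1 ≠ []) :
    args.foldl (neatStepA fn ii si ll) (pvAbs fn ii si st) =
      pvAbs fn ii si (args.foldl (neatStepB fn ii si ll) st) := by
  induction args generalizing st with
  | nil => rfl
  | cons a args ih =>
      obtain ⟨gs, cur, w⟩ := st
      obtain ⟨h, t⟩ : ∃ h t, cur = h :: t := by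
        cases cur with
        | nil => exact absurd rfl hst
        | cons h t => exact ⟨h, t, rfl⟩
      obtain ⟨t, rfl⟩ := t
      simp only [List.foldl_cons, step_rel]
      exact ih _ (stepB_cur_ne_nil fn ii si ll _ a)

-- first iteration from both initial states
lemma base_rel (fn ii si : String) (ll : Int) (a : String) :
    neatStepA fn ii si ll ([], [], 0, 0, true) a =
      pvAbs fn ii si (neatStepB fn ii si ll ([], [], 0) a) := by
  simp [neatStepA, neatStepB, pvAbs, pvPreOf, pvInterior, Prod.mk.injEq]
  omega

-- phase 2 of B renders exactly interior ++ final line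
lemma render_tail (fn ii si : String) (last : Int) (t : List (List String)) (c : List String)
    (s : Int) (hs : 1 ≤ s) (hlast : s + t.length = last) :
    (PySem.List.enumerate (t ++ [c]) s).map (fun p =>
        (if p.1 == 0 then ii ++ fn ++ "(" ++ PySem.Str.join ", " p.2
         else si ++ PySem.Str.join ", " p.2) ++
          (if p.1 < last then "," else ")")) =
      t.map (fun g => si ++ PySem.Str.join ", " g ++ ",") ++
        [si ++ PySem.Str.join ", " c ++ ")"] := by
  induction t generalizing s with
  | nil =>
      simp at hlast
      simp only [PySem.List.enumerate_cons, PySem.List.enumerate_nil, List.nil_append,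
        List.map_cons, List.map_nil]
      rw [show ((s : Int) == 0) = false by simp; omega,
        if_neg (show ¬ s < last by omega)]
      simp [String.append_assoc]
  | cons g t ih =>
      simp only [List.cons_append, PySem.List.enumerate_cons, List.map_cons]
      have hl2 : (s+1) + (t.length : Int) = last := by
        subst hlast; push_cast [List.length_cons]; ring
      rw [ih (s+1) (by omega) hl2]
      congr 1
      have h0 : (s == 0) = false := by simp; omega
      have h1 : s < last := by subst hlast; push_cast [List.length_cons]; omega
      simp [h0, if_pos h1, String.append_assoc]

lemma render_eq (fn ii si : String) (gs : List (List String)) (c : List String) :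
    (PySem.List.enumerate (gs ++ [c])).map (fun p =>
        (if p.1 == 0 then ii ++ fn ++ "(" ++ PySem.Str.join ", " p.2
         else si ++ PySem.Str.join ", " p.2) ++
          (if p.1 < PySem.List.len (gs ++ [c]) - 1 then "," else ")")) =
      pvInterior fn ii si gs ++ [pvPreOf fn ii si gs ++ PySem.Str.join ", " c ++ ")"] := by
  cases gs with
  | nil =>
      simp [PySem.List.enumerate_cons, PySem.List.enumerate_nil, pvInterior, pvPreOf,
        PySem.List.len_eq, String.append_assoc]
  | cons g t =>
      have hlast : (1 : Int) + t.length = PySem.List.len (g :: (t ++ [c])) - 1 := by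
        simp [PySem.List.len_eq]; try omega
      have h1 : (0 : Int) < PySem.List.len (g :: (t ++ [c])) - 1 := by
        simp [PySem.List.len_eq]; try omega
      simp only [List.cons_append, PySem.List.enumerate_cons, List.map_cons, zero_add,
        pvInterior, List.isEmpty_cons, pvPreOf]
      congr 1
      · simp [if_pos h1, String.append_assoc]
      · exact render_tail fn ii si _ t c 1 (by omega) hlast

-- A's epilogue equals B's phase 2, through pvAbs
lemma final_eq (fn ii si : String) (st : List (List String) × List String × Int)
    (h : st.2.1 ≠ []) :
    (pvAbs fn ii si st).1 ++
        [PySem.Str.join ", " (pvSetLast (pvAbs fn ii si st).2.1 ")")] =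
      (PySem.List.enumerate (st.1 ++ [st.2.1])).map (fun p =>
        (if p.1 == 0 then ii ++ fn ++ "(" ++ PySem.Str.join ", " p.2
         else si ++ PySem.Str.join ", " p.2) ++
          (if p.1 < PySem.List.len (st.1 ++ [st.2.1]) - 1 then "," else ")")) := by
  obtain ⟨gs, cur, w⟩ := st
  obtain ⟨hh, t⟩ : ∃ hh t, cur = hh :: t := by
    cases cur with
    | nil => exact absurd rfl h
    | cons hh t => exact ⟨hh, t, rfl⟩
  obtain ⟨t, rfl⟩ := t
  rw [render_eq]
  simp only [pvAbs]
  rw [join_setLast, join_cons_append]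

-- ===== VERDICT (by name: the statement is the Claim_ definition above) =====
theorem neat_write_spec : Claim_equal_neat_write := by
  intro fn args ll ii si _ hpre
  unfold Spec_neat_write
  cases args with
  | nil => exact absurd rfl hpre
  | cons a args =>
      show neat_write fn (a :: args) ll ii si = neat_write_alt fn (a :: args) ll ii si
      unfold neat_write neat_write_alt
      simp only [List.foldl_cons]
      rw [base_rel, loop_rel fn ii si ll args _ (stepB_cur_ne_nil fn ii si ll _ a)]
      exact final_eq fn ii si _
        (foldB_cur_ne_nil fn ii si ll args _ (stepB_cur_ne_nil fn ii si ll _ a))
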